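-- pv_equiv track=rewrite | github.com/lin157644/EventSourceWebsiteScraping | event_source_urls_extraction/EvaluateMultitaskModelAPI.py | GetLeaveFeature
-- ===== SOURCE A (Python) =====
-- def GetLeaveFeature(leaveIndex, trainFeatures):
--     leaveFeatures = [[], [], [], [], [], [], [], [], [], [], [], [], [], [], []]
--     for index in leaveIndex:
--         i = 0
--         tmp = index
--         while tmp >= len(trainFeatures[i]):
--             tmp -= len(trainFeatures[i])
--             i += 1
--         leaveFeatures[i].append(trainFeatures[i][tmp])
--     leaveFeatures = [l for l in leaveFeatures if l != []]
--     return leaveFeatures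
-- ===== SOURCE B (Python) =====
-- def GetLeaveFeature(leaveIndex, trainFeatures):
--     # Prefix-sum offsets over the feature lists, then binary search per index,
--     # collecting into a dict keyed by owning list; emit buckets in ascending key order.
--     prefix = [0]
--     for l in trainFeatures:
--         prefix.append(prefix[-1] + len(l))
--     buckets = {}
--     for index in leaveIndex:
--         lo, hi = 0, len(trainFeatures)
--         while lo < hi:
--             mid = (lo + hi) // 2
--             if index < prefix[mid + 1]:
--                 hi = mid
--             else:
--                 lo = mid + 1
--         buckets[lo] = buckets.get(lo, []) + [trainFeatures[lo][index - prefix[lo]]]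
--     return [buckets[i] for i in sorted(buckets)]
-- ===== Notes on version B (the rewrite author's own statement) =====
-- stated objective: alternative
-- what changed: A resolves each leave index by a per-index linear subtraction walk over the feature lists into a fixed 15-slot bucket array that is filtered at the end; B precomputes a prefix-sum offset array once, binary-searches it per index to find the owning list, and groups values in a dict emitted in ascending key order.
import Mathlib
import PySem

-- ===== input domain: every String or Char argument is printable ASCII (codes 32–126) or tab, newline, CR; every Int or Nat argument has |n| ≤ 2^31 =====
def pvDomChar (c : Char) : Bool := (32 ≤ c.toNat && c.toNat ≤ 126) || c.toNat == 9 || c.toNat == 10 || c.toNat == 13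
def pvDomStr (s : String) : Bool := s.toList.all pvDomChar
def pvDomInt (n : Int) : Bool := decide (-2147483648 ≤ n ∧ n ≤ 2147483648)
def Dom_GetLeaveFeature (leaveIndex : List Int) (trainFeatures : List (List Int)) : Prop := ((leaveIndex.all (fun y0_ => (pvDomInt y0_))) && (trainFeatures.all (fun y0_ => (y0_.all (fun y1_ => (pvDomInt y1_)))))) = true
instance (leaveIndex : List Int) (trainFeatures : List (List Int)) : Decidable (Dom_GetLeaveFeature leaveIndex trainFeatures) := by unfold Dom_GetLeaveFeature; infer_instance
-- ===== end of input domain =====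

-- B replaces A's per-index linear subtraction walk with a prefix-sum offset array, binary search
-- per index and a dict of buckets emitted in ascending key order (alternative decomposition, same cost class).

-- ===== PORT A =====
-- the inner 'while tmp >= len(trainFeatures[i])' walk; running off the list is where Python raises IndexError (excluded by Pre_)
def pvAFind (tmp : Int) (i : Nat) : List (List Int) → Nat × Int
  | [] => (i, tmp)
  | l :: rest => if (l.length : Int) ≤ tmp then pvAFind (tmp - (l.length : Int)) (i + 1) rest else (i, tmp)

-- leaveFeatures[i].append(v); i out of range is where Python raises IndexError (excluded by Pre_)
def pvAppendAt : List (List Int) → Nat → Int → List (List Int)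
  | [], _, _ => []
  | b :: t, 0, v => (b ++ [v]) :: t
  | b :: t, n + 1, v => b :: pvAppendAt t n v

def GetLeaveFeature (leaveIndex : List Int) (trainFeatures : List (List Int)) : List (List Int) :=
  (leaveIndex.foldl (fun buckets index =>
      let r := pvAFind index 0 trainFeatures
      pvAppendAt buckets r.1 (PySem.List.pyGetD (trainFeatures.getD r.1 []) r.2 0))
    [[], [], [], [], [], [], [], [], [], [], [], [], [], [], []]).filter (fun l => !(l == []))

-- ===== PORT B =====
-- the 'while lo < hi' binary search over the prefix array
def pvBSearch (pr : List Int) (index : Int) (lo hi : Nat) : Nat :=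
  if h : lo < hi then
    let mid := (lo + hi) / 2
    if index < PySem.List.pyGetD pr ((mid : Int) + 1) 0 then
      pvBSearch pr index lo mid
    else
      pvBSearch pr index (mid + 1) hi
  else lo
termination_by hi - lo
decreasing_by all_goals omega

def GetLeaveFeature_alt (leaveIndex : List Int) (trainFeatures : List (List Int)) : List (List Int) :=
  let pre := trainFeatures.foldl (fun p l => p ++ [PySem.List.pyGetD p (-1) 0 + (l.length : Int)]) [(0 : Int)]
  let buckets := leaveIndex.foldl (fun d index =>
      let lo := pvBSearch pre index 0 trainFeatures.length
      d.modify lo ([] : List Int)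
        (fun b => b ++ [PySem.List.pyGetD (trainFeatures.getD lo [])
                          (index - PySem.List.pyGetD pre (lo : Int) 0) 0]))
    PySem.Dict.empty
  (PySem.List.sorted buckets.keys (fun k => k) false).map (fun k => buckets.getD k [])

-- ===== PRECONDITION & SPEC =====
-- exactly the inputs on which the Python A returns normally: each non-negative index must fall inside the
-- first 15 feature lists (beyond them A's fixed 15-bucket array or the list walk raises IndexError), and each
-- negative index must be a valid Python negative index into the first feature list.
def Pre_GetLeaveFeature (leaveIndex : List Int) (trainFeatures : List (List Int)) : Prop :=
  ∀ idx ∈ leaveIndex,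
    (0 ≤ idx → idx < ((trainFeatures.take 15).map (fun l => (l.length : Int))).sum) ∧
    (idx < 0 → trainFeatures ≠ [] ∧ -idx ≤ ((trainFeatures.getD 0 []).length : Int))
instance (leaveIndex : List Int) (trainFeatures : List (List Int)) : Decidable (Pre_GetLeaveFeature leaveIndex trainFeatures) := by unfold Pre_GetLeaveFeature; infer_instance

def pvWitness_GetLeaveFeature : List Int × List (List Int) := ([0, -1, 3], [[10, 20], [30], [40]])

def Spec_GetLeaveFeature (leaveIndex : List Int) (trainFeatures : List (List Int)) (out : List (List Int)) : Prop := out = GetLeaveFeature_alt leaveIndex trainFeatures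
instance (leaveIndex : List Int) (trainFeatures : List (List Int)) (out : List (List Int)) : Decidable (Spec_GetLeaveFeature leaveIndex trainFeatures out) := by unfold Spec_GetLeaveFeature; infer_instance

-- ===== CLAIM (what is proved, stated in full; the proofs are below) =====
def Claim_equal_GetLeaveFeature : Prop := ∀ (leaveIndex : List Int) (trainFeatures : List (List Int)), Dom_GetLeaveFeature leaveIndex trainFeatures → Pre_GetLeaveFeature leaveIndex trainFeatures → Spec_GetLeaveFeature leaveIndex trainFeatures (GetLeaveFeature leaveIndex trainFeatures)

-- ===== LEMMAS AND PROOFS =====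

-- canonical prefix-sum list: pvPfx s ls = [s, s+len ls0, s+len ls0+len ls1, …]
def pvPfx (s : Int) : List (List Int) → List Int
  | [] => [s]
  | l :: ls => s :: pvPfx (s + (l.length : Int)) ls

def pvOwn (tf : List (List Int)) (idx : Int) : Nat := (pvAFind idx 0 tf).1
def pvVal (tf : List (List Int)) (idx : Int) : Int :=
  PySem.List.pyGetD (tf.getD (pvOwn tf idx) []) ((pvAFind idx 0 tf).2) 0
def pvGrp (tf : List (List Int)) (idxs : List Int) (k : Nat) : List Int :=
  (idxs.filter (fun idx => pvOwn tf idx == k)).map (pvVal tf)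

theorem pvPfx_getD_zero (s : Int) (ls : List (List Int)) : (pvPfx s ls).getD 0 0 = s := by
  cases ls <;> rfl

theorem pvPfx_shift (s t : Int) (ls : List (List Int)) (k : Nat) (hk : k ≤ ls.length) :
    (pvPfx (s + t) ls).getD k 0 = s + (pvPfx t ls).getD k 0 := by
  induction ls generalizing t k with
  | nil =>
    have : k = 0 := by simpa using hk
    subst this; rfl
  | cons l ls ih =>
    cases k with
    | zero => simp [pvPfx]
    | succ k =>
      simp only [pvPfx, List.getD_cons_succ]
      rw [add_assoc]
      exact ih (t + l.length) k (by simpa using hk)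

theorem pvPfx_le (s : Int) (ls : List (List Int)) (k : Nat) (hk : k ≤ ls.length) :
    s ≤ (pvPfx s ls).getD k 0 := by
  induction ls generalizing s k with
  | nil =>
    have : k = 0 := by simpa using hk
    subst this; simp [pvPfx]
  | cons l ls ih =>
    cases k with
    | zero => simp [pvPfx]
    | succ k =>
      simp only [pvPfx, List.getD_cons_succ]
      have := ih (s + (l.length : Int)) k (by simpa using hk)
      have hl : (0 : Int) ≤ (l.length : Int) := by positivity
      omega

theorem pvPfx_mono (s : Int) (ls : List (List Int)) (j k : Nat) (hjk : j ≤ k) (hk : k ≤ ls.length) :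
    (pvPfx s ls).getD j 0 ≤ (pvPfx s ls).getD k 0 := by
  induction ls generalizing s j k with
  | nil =>
    have hk0 : k = 0 := by simpa using hk
    have hj0 : j = 0 := by omega
    subst hk0; subst hj0; exact le_refl _
  | cons l ls ih =>
    cases j with
    | zero =>
      cases k with
      | zero => exact le_refl _
      | succ k =>
        simp only [pvPfx, List.getD_cons_zero, List.getD_cons_succ]
        have := pvPfx_le (s + (l.length : Int)) ls k (by simpa using hk)
        have hl : (0 : Int) ≤ (l.length : Int) := by positivity
        omega
    | succ j =>
      cases k with
      | zero => omega
      | succ k =>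
        simp only [pvPfx, List.getD_cons_succ]
        exact ih (s + l.length) j k (by omega) (by simpa using hk)

theorem pvPfx_sum (s : Int) (ls : List (List Int)) :
    (pvPfx s ls).getD ls.length 0 = s + (ls.map (fun l => (l.length : Int))).sum := by
  induction ls generalizing s with
  | nil => simp [pvPfx]
  | cons l ls ih =>
    simp only [pvPfx, List.length_cons, List.getD_cons_succ, List.map_cons, List.sum_cons]
    rw [ih]; ring

theorem pvPfx_take (s : Int) (ls : List (List Int)) (m : Nat) :
    pvPfx s (ls.take m) = (pvPfx s ls).take (m + 1) := by
  induction ls generalizing s m with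
  | nil => simp [pvPfx]
  | cons l ls ih =>
    cases m with
    | zero => simp [pvPfx]
    | succ m => simp [pvPfx, ih]

-- A's inner while loop lands on the least o with idx < pfx[o+1], returning the residual offset
theorem pvAFind_eq (ls : List (List Int)) (tmp : Int) (i o : Nat)
    (ho : o < ls.length)
    (hlt : tmp < (pvPfx 0 ls).getD (o + 1) 0)
    (hge : ∀ j < o, (pvPfx 0 ls).getD (j + 1) 0 ≤ tmp) :
    pvAFind tmp i ls = (i + o, tmp - (pvPfx 0 ls).getD o 0) := by
  induction ls generalizing tmp i o with
  | nil => simp at ho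
  | cons l ls ih =>
    have hs1 : ∀ k ≤ ls.length, (pvPfx 0 (l :: ls)).getD (k + 1) 0
        = (l.length : Int) + (pvPfx 0 ls).getD k 0 := by
      intro k hk
      simp only [pvPfx, List.getD_cons_succ]
      have := pvPfx_shift (l.length : Int) 0 ls k hk
      rw [zero_add] at *
      simpa using this
    cases o with
    | zero =>
      have hlt0 : tmp < (l.length : Int) := by
        have h1 := hs1 0 (by omega)
        rw [pvPfx_getD_zero] at h1
        omega
      have h00 : (pvPfx 0 (l :: ls)).getD 0 0 = 0 := pvPfx_getD_zero 0 (l :: ls)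
      simp only [pvAFind]
      rw [if_neg (show ¬ ((l.length : Int) ≤ tmp) by omega), h00]
      simp
    | succ o =>
      have hlen : o < ls.length := by simpa using ho
      have hge0 : (l.length : Int) ≤ tmp := by
        have := hge 0 (by omega)
        rw [hs1 0 (by omega), pvPfx_getD_zero] at this
        omega
      simp only [pvAFind]
      rw [if_pos hge0]
      rw [ih (tmp - l.length) (i + 1) o hlen
        (by rw [hs1 (o + 1) (by omega)] at hlt; omega)
        (by
          intro j hj
          have := hge (j + 1) (by omega)
          rw [hs1 (j + 1) (by omega)] at this
          omega)]
      rw [hs1 o (by omega)]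
      simp only [Prod.mk.injEq]
      exact ⟨by omega, by omega⟩

-- B's binary search over the same prefix list finds the same owner
theorem pvBSearch_eq (ls : List (List Int)) (idx : Int) (o lo hi : Nat)
    (hlt : idx < (pvPfx 0 ls).getD (o + 1) 0)
    (hge : ∀ j < o, (pvPfx 0 ls).getD (j + 1) 0 ≤ idx)
    (h1 : lo ≤ o) (h2 : o ≤ hi) (h3 : hi ≤ ls.length) :
    pvBSearch (pvPfx 0 ls) idx lo hi = o := by
  induction hfuel : hi - lo using Nat.strong_induction_on generalizing lo hi with
  | _ n ih =>
    subst hfuel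
    rw [pvBSearch]
    by_cases hlh : lo < hi
    · rw [dif_pos hlh]
      have hcast : (((lo + hi) / 2 : Nat) : Int) + 1 = (((lo + hi) / 2 + 1 : Nat) : Int) := by
        push_cast; ring
      simp only [hcast, PySem.List.pyGetD_natCast]
      by_cases hc : idx < (pvPfx 0 ls).getD ((lo + hi) / 2 + 1) 0
      · rw [if_pos (by simpa using hc)]
        have hom : o ≤ (lo + hi) / 2 := by
          by_contra h
          exact absurd hc (not_lt.mpr (hge ((lo + hi) / 2) (by omega)))
        exact ih ((lo + hi) / 2 - lo) (by omega) lo ((lo + hi) / 2) h1 hom (by omega) rfl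
      · rw [if_neg (by simpa using hc)]
        have hom : (lo + hi) / 2 + 1 ≤ o := by
          by_contra h
          have hmono := pvPfx_mono 0 ls (o + 1) ((lo + hi) / 2 + 1) (by omega) (by omega)
          omega
        exact ih (hi - ((lo + hi) / 2 + 1)) (by omega) ((lo + hi) / 2 + 1) hi hom h2 h3 rfl
    · rw [dif_neg hlh]
      omega

-- B's prefix-building loop builds pvPfx
theorem pvPrefixFold (ls : List (List Int)) (p : List Int) (s : Int) :
    ls.foldl (fun p l => p ++ [PySem.List.pyGetD p (-1) 0 + (l.length : Int)]) (p ++ [s])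
      = p ++ pvPfx s ls := by
  induction ls generalizing p s with
  | nil => rfl
  | cons l ls ih =>
    simp only [List.foldl_cons, PySem.List.pyGetD_neg_one_append_singleton, pvPfx]
    rw [show (p ++ [s]) ++ [s + (l.length : Int)] = (p ++ [s]) ++ [s + (l.length : Int)] from rfl,
        ih (p ++ [s]) (s + (l.length : Int))]
    simp

theorem length_pvAppendAt (bs : List (List Int)) (i : Nat) (v : Int) :
    (pvAppendAt bs i v).length = bs.length := by
  induction bs generalizing i with
  | nil => rfl
  | cons b t ih => cases i <;> simp [pvAppendAt, ih]

theorem getD_pvAppendAt (bs : List (List Int)) (i : Nat) (v : Int) (k : Nat) :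
    (pvAppendAt bs i v).getD k [] =
      if k = i ∧ i < bs.length then bs.getD k [] ++ [v] else bs.getD k [] := by
  induction bs generalizing i k with
  | nil => simp [pvAppendAt]
  | cons b t ih =>
    cases i with
    | zero =>
      cases k <;> simp [pvAppendAt]
    | succ i =>
      cases k with
      | zero => simp [pvAppendAt]
      | succ k =>
        simp only [pvAppendAt, List.getD_cons_succ, ih, List.length_cons]
        by_cases h : k = i ∧ i < t.length
        · rw [if_pos h, if_pos ⟨by omega, by omega⟩]
        · rw [if_neg h, if_neg (by omega)]

-- the owner facts each admitted index enjoys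
theorem pvOwner_facts (tf : List (List Int)) (idx : Int)
    (h0 : 0 ≤ idx → idx < ((tf.take 15).map (fun l => (l.length : Int))).sum)
    (h1 : idx < 0 → tf ≠ [] ∧ -idx ≤ ((tf.getD 0 []).length : Int)) :
    pvOwn tf idx < 15 ∧ pvOwn tf idx < tf.length ∧
    pvAFind idx 0 tf = (pvOwn tf idx, idx - (pvPfx 0 tf).getD (pvOwn tf idx) 0) ∧
    pvBSearch (pvPfx 0 tf) idx 0 tf.length = pvOwn tf idx := by
  have hex : ∃ j, idx < (pvPfx 0 tf).getD (j + 1) 0 ∧ j < 15 ∧ j < tf.length := by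
    rcases le_or_gt 0 idx with hpos | hneg
    · have hsum := h0 hpos
      have hms : ((tf.take 15).map (fun l => (l.length : Int))).sum
          = (pvPfx 0 tf).getD (min 15 tf.length) 0 := by
        have h1 := pvPfx_sum 0 (tf.take 15)
        rw [pvPfx_take, zero_add] at h1
        rw [← h1, List.length_take]
        simp only [List.getD_eq_getElem?_getD]
        rw [List.getElem?_take_of_lt (by omega)]
      rw [hms] at hsum
      have hm1 : 1 ≤ min 15 tf.length := by
        by_contra h
        have : min 15 tf.length = 0 := by omega
        rw [this, pvPfx_getD_zero] at hsum
        omega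
      exact ⟨min 15 tf.length - 1, by
        have : min 15 tf.length - 1 + 1 = min 15 tf.length := by omega
        rw [this]; exact hsum, by omega, by omega⟩
    · obtain ⟨hne, _⟩ := h1 hneg
      have hlen : 1 ≤ tf.length := by
        cases tf with
        | nil => exact absurd rfl hne
        | cons a t => simp
      exact ⟨0, by simpa using lt_of_lt_of_le hneg (pvPfx_le 0 tf 1 (by omega)), by omega, by omega⟩
  have hex' : ∃ j, idx < (pvPfx 0 tf).getD (j + 1) 0 := ⟨hex.choose, hex.choose_spec.1⟩
  set o := Nat.find hex' with hodef
  have hlt : idx < (pvPfx 0 tf).getD (o + 1) 0 := Nat.find_spec hex'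
  have hge : ∀ j < o, (pvPfx 0 tf).getD (j + 1) 0 ≤ idx := by
    intro j hj
    have := Nat.find_min hex' hj
    omega
  have hole : o ≤ hex.choose := Nat.find_min' hex' hex.choose_spec.1
  have ho15 : o < 15 := by have := hex.choose_spec.2.1; omega
  have holen : o < tf.length := by have := hex.choose_spec.2.2; omega
  have hfind : pvAFind idx 0 tf = (o, idx - (pvPfx 0 tf).getD o 0) := by
    simpa using pvAFind_eq tf idx 0 o holen hlt hge
  have hown : pvOwn tf idx = o := by rw [pvOwn, hfind]
  rw [hown]
  exact ⟨ho15, holen, hfind, pvBSearch_eq tf idx o 0 tf.length hlt hge (by omega) (by omega) le_rfl⟩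

-- A's bucket-filling loop, characterised slot by slot
theorem pvAFold (tf : List (List Int)) (idxs : List Int) (bs : List (List Int))
    (hb : bs.length = 15) (hown : ∀ idx ∈ idxs, pvOwn tf idx < 15) :
    (idxs.foldl (fun buckets index =>
        pvAppendAt buckets (pvOwn tf index) (pvVal tf index)) bs).length = 15 ∧
    ∀ k, (idxs.foldl (fun buckets index =>
        pvAppendAt buckets (pvOwn tf index) (pvVal tf index)) bs).getD k []
          = bs.getD k [] ++ pvGrp tf idxs k := by
  induction idxs generalizing bs with
  | nil => exact ⟨hb, fun k => by simp [pvGrp]⟩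
  | cons idx rest ih =>
    have hoi : pvOwn tf idx < 15 := hown idx (by simp)
    have hb' : (pvAppendAt bs (pvOwn tf idx) (pvVal tf idx)).length = 15 := by
      rw [length_pvAppendAt]; exact hb
    obtain ⟨hl, hg⟩ := ih (pvAppendAt bs (pvOwn tf idx) (pvVal tf idx)) hb'
      (fun i hi => hown i (by simp [hi]))
    refine ⟨hl, fun k => ?_⟩
    simp only [List.foldl_cons]
    rw [hg k, getD_pvAppendAt]
    simp only [pvGrp, List.filter_cons]
    by_cases hk : pvOwn tf idx = k
    · rw [if_pos ⟨hk.symm, by omega⟩]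
      have hbeq : (pvOwn tf idx == k) = true := by simp [hk]
      rw [hbeq]
      simp [List.append_assoc]
    · rw [if_neg (fun h => hk h.1.symm)]
      have hbeq : (pvOwn tf idx == k) = false := by simp [hk]
      rw [hbeq]
      simp

theorem pvGrp_ne_nil_iff (tf : List (List Int)) (idxs : List Int) (k : Nat) :
    ¬ pvGrp tf idxs k = [] ↔ k ∈ idxs.map (pvOwn tf) := by
  simp only [pvGrp, List.map_eq_nil_iff, List.filter_eq_nil_iff, List.mem_map]
  push Not
  constructor
  · rintro ⟨x, hx, hk⟩; exact ⟨x, hx, by simpa using hk⟩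
  · rintro ⟨x, hx, hk⟩; exact ⟨x, hx, by simpa using hk⟩

-- ===== VERDICT (by name: the statement is the Claim_ definition above) =====
theorem GetLeaveFeature_spec : Claim_equal_GetLeaveFeature := by
  intro idxs tf _hDom hPre
  unfold Spec_GetLeaveFeature
  have hfacts := fun idx (h : idx ∈ idxs) => pvOwner_facts tf idx (hPre idx h).1 (hPre idx h).2
  have hown15 : ∀ idx ∈ idxs, pvOwn tf idx < 15 := fun idx h => (hfacts idx h).1
  -- ===== A side =====
  have hAbody : (fun (buckets : List (List Int)) (index : Int) =>
      let r := pvAFind index 0 tf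
      pvAppendAt buckets r.1 (PySem.List.pyGetD (tf.getD r.1 []) r.2 0))
      = fun buckets index => pvAppendAt buckets (pvOwn tf index) (pvVal tf index) := rfl
  have hinit : ∀ k : Nat, ([[], [], [], [], [], [], [], [], [], [], [], [], [], [], []] : List (List Int)).getD k [] = [] := by
    intro k
    simp only [List.getD_eq_getElem?_getD]
    rcases k with _|_|_|_|_|_|_|_|_|_|_|_|_|_|_|k <;> simp
  obtain ⟨hlen, hgetD⟩ := pvAFold tf idxs
    [[], [], [], [], [], [], [], [], [], [], [], [], [], [], []] (by rfl) hown15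
  have hA : GetLeaveFeature idxs tf
      = ((List.range 15).filter (fun k => !(pvGrp tf idxs k == []))).map (pvGrp tf idxs) := by
    rw [GetLeaveFeature, hAbody]
    have hres : idxs.foldl (fun buckets index => pvAppendAt buckets (pvOwn tf index) (pvVal tf index))
        [[], [], [], [], [], [], [], [], [], [], [], [], [], [], []] = (List.range 15).map (pvGrp tf idxs) := by
      apply List.ext_getElem
      · simp [hlen]
      · intro k h1 h2
        have hk15 : k < 15 := by simpa using h2
        have hgd := hgetD k
        rw [hinit k] at hgd
        rw [← List.getD_eq_getElem _ [] h1, hgd]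
        simp
    rw [hres, List.filter_map]
    rfl
  -- ===== B side =====
  have hpre : tf.foldl (fun p l => p ++ [PySem.List.pyGetD p (-1) 0 + (l.length : Int)]) [(0 : Int)]
      = pvPfx 0 tf := by
    simpa using pvPrefixFold tf [] 0
  rw [hA, GetLeaveFeature_alt]
  simp only [hpre]
  have hbody : idxs.foldl (fun d index =>
        let lo := pvBSearch (pvPfx 0 tf) index 0 tf.length
        d.modify lo ([] : List Int)
          (fun b => b ++ [PySem.List.pyGetD (tf.getD lo [])
            (index - PySem.List.pyGetD (pvPfx 0 tf) (lo : Int) 0) 0]))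
      PySem.Dict.empty
      = idxs.foldl (fun d index =>
          d.modify (pvOwn tf index) ([] : List Int) (fun b => b ++ [pvVal tf index]))
        PySem.Dict.empty := by
    apply PySem.List.foldl_congr_mem
    intro d idx hmem
    obtain ⟨_, _, hfind, hbs⟩ := hfacts idx hmem
    simp only [hbs]
    have hv : PySem.List.pyGetD (tf.getD (pvOwn tf idx) [])
        (idx - PySem.List.pyGetD (pvPfx 0 tf) ((pvOwn tf idx : Nat) : Int) 0) 0 = pvVal tf idx := by
      rw [PySem.List.pyGetD_natCast, pvVal, hfind]
    rw [hv]
  simp only [hbody]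
  set d := idxs.foldl (fun d index =>
      d.modify (pvOwn tf index) ([] : List Int) (fun b => b ++ [pvVal tf index]))
    PySem.Dict.empty with hd
  have hkeys : d.keys = PySem.Set.ofList (idxs.map (pvOwn tf)) := by
    rw [hd, PySem.Dict.keys_foldl_modify_key (f := fun _ index => fun b => b ++ [pvVal tf index])]
    simp [PySem.Set.update_nil_left]
  have hmap : (idxs.map (fun index => (pvOwn tf index, pvVal tf index))).foldl
      (fun (d : PySem.Dict Nat (List Int)) (p : Nat × Int) => d.modify p.1 [] (fun b => b ++ [p.2]))
      PySem.Dict.empty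
      = idxs.foldl (fun d index =>
          d.modify (pvOwn tf index) ([] : List Int) (fun b => b ++ [pvVal tf index]))
        PySem.Dict.empty := by
    rw [List.foldl_map]
  have hgd : ∀ c : Nat, d.getD c [] = pvGrp tf idxs c := by
    intro c
    rw [hd, ← hmap]
    rw [PySem.Dict.getD_foldl_modify_append]
    rw [List.filter_map, List.map_map]
    simp [pvGrp, Function.comp_def]
  have hsorted : PySem.List.sorted d.keys (fun k => k) false
      = (List.range 15).filter (fun k => !(pvGrp tf idxs k == [])) := by
    apply PySem.List.sorted_eq_of_perm_of_pairwise_lt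
    · rw [hkeys]
      apply (List.perm_ext_iff_of_nodup
        (List.Nodup.filter _ List.nodup_range) (PySem.Set.nodup_ofList _)).mpr
      intro a
      simp only [PySem.Set.mem_ofList, List.mem_filter, List.mem_range, List.mem_map]
      constructor
      · rintro ⟨_, hne⟩
        have h := (pvGrp_ne_nil_iff tf idxs a).mp (by simpa using hne)
        simpa [List.mem_map] using h
      · rintro ⟨x, hx, rfl⟩
        refine ⟨hown15 x hx, ?_⟩
        have h2 : ¬ pvGrp tf idxs (pvOwn tf x) = [] :=
          (pvGrp_ne_nil_iff tf idxs (pvOwn tf x)).mpr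
            (by simp only [List.mem_map]; exact ⟨x, hx, rfl⟩)
        simpa using h2
    · exact List.Pairwise.filter (fun k => !(pvGrp tf idxs k == [])) List.pairwise_lt_range
  rw [hsorted]
  simp only [hgd]
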